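-- pv_equiv track=rewrite | github.com/Princeton-Cabernet/DFA-synthesis | genDFA.py | orderByState
-- ===== SOURCE A (Python) =====
-- def orderByState(transitions):
--     result = {}
--     for transition in transitions:
--         if transition[2] in result:
--             result[transition[2]].append(transition)
--         else:
--             result[transition[2]] = [transition]
--     return sorted(result.values(), key = len)
-- ===== SOURCE B (Python) =====
-- def orderByState(transitions):
--     states = list(dict.fromkeys(t[2] for t in transitions))
--     groups = [[t for t in transitions if t[2] == s] for s in states]
--     return sorted(groups, key=len)
-- ===== Notes on version B (the rewrite author's own statement) =====
-- stated objective: idiomatic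
-- what changed: Replaces the one-pass dict-grouping loop by dict.fromkeys dedup of the distinct states in first-appearance order followed by one filter comprehension per state, then the same stable sort by length.
import Mathlib
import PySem

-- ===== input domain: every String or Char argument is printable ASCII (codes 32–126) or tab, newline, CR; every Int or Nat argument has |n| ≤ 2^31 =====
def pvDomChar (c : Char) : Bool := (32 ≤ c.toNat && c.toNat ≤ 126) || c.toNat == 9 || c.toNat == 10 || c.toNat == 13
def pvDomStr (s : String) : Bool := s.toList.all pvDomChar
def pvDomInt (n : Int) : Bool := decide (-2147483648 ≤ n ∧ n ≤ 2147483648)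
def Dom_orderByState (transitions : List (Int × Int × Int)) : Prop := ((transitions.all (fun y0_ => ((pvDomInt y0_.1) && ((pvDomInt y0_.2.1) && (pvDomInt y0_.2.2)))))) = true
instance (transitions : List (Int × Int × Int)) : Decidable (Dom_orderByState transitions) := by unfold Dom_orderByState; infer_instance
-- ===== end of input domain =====

-- B builds the distinct states first and one filtered group per state; one honest line:
-- B replaces A's one-pass dict grouping by dedup-of-states + per-state filters (same stable sort by length); not faster, just a different decomposition.

-- ===== PORT A =====
def orderByState (transitions : List (Int × Int × Int)) : List (List (Int × Int × Int)) :=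
  let result := transitions.foldl
    (fun d t =>
      if d.contains t.2.2 then
        d.insert t.2.2 (d.getD t.2.2 [] ++ [t])   -- result[t[2]].append(t)
      else
        d.insert t.2.2 [t])                       -- result[t[2]] = [t]
    (PySem.Dict.empty : PySem.Dict Int (List (Int × Int × Int)))
  PySem.List.sorted result.values (fun g => g.length) false

-- ===== PORT B =====
def orderByState_alt (transitions : List (Int × Int × Int)) : List (List (Int × Int × Int)) :=
  let states := PySem.List.dedup (transitions.map (fun t => t.2.2))
  let groups := states.map (fun s => transitions.filter (fun t => t.2.2 == s))
  PySem.List.sorted groups (fun g => g.length) false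

-- ===== PRECONDITION & SPEC =====
def Spec_orderByState (transitions : List (Int × Int × Int)) (out : List (List (Int × Int × Int))) : Prop := out = orderByState_alt transitions
instance (transitions : List (Int × Int × Int)) (out : List (List (Int × Int × Int))) : Decidable (Spec_orderByState transitions out) := by unfold Spec_orderByState; infer_instance

-- ===== CLAIM (what is proved, stated in full; the proofs are below) =====
def Claim_equal_orderByState : Prop := ∀ (transitions : List (Int × Int × Int)), Dom_orderByState transitions → Spec_orderByState transitions (orderByState transitions)

-- ===== LEMMAS AND PROOFS =====

-- A's loop body equals a single Dict.modify step.
theorem step_eq_modify (d : PySem.Dict Int (List (Int × Int × Int))) (t : Int × Int × Int) :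
    (if d.contains t.2.2 then d.insert t.2.2 (d.getD t.2.2 [] ++ [t]) else d.insert t.2.2 [t])
      = d.modify t.2.2 [] (· ++ [t]) := by
  by_cases h : d.contains t.2.2 <;>
    simp [PySem.Dict.modify, h, PySem.Dict.getD_of_not_contains]

-- getD of the grouping fold: the group at c is the filter of the processed prefix.
theorem getD_fold (l : List (Int × Int × Int)) (d : PySem.Dict Int (List (Int × Int × Int))) (c : Int) :
    (l.foldl (fun d t => d.modify t.2.2 [] (· ++ [t])) d).getD c []
      = d.getD c [] ++ l.filter (fun t => t.2.2 == c) := by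
  induction l generalizing d with
  | nil => simp
  | cons t l ih =>
      simp only [List.foldl_cons, List.filter_cons, ih]
      rw [PySem.Dict.getD_modify]
      by_cases h : c = t.2.2
      · simp [h]
      · simp [h]
        intro hh; exact h hh.symm

theorem orderByState_spec' : ∀ (transitions : List (Int × Int × Int)),
    orderByState transitions = orderByState_alt transitions := by
  intro ts
  unfold orderByState orderByState_alt
  simp only [funext fun d => funext fun t => step_eq_modify d t]
  have hnd : (ts.foldl (fun d t => d.modify t.2.2 [] (· ++ [t]))
      (PySem.Dict.empty : PySem.Dict Int (List (Int × Int × Int)))).keys.Nodup := by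
    exact PySem.Dict.nodup_keys_foldl_modify_key ts (fun t => t.2.2) _ _ _ (by simp)
  have hkeys : (ts.foldl (fun d t => d.modify t.2.2 [] (· ++ [t]))
      (PySem.Dict.empty : PySem.Dict Int (List (Int × Int × Int)))).keys
      = PySem.List.dedup (ts.map (fun t => t.2.2)) := by
    rw [PySem.Dict.keys_foldl_modify_key]
    simp [PySem.Set.update, PySem.Set.ofList_eq_foldl]
  have hvals := PySem.Dict.values_eq_map_keys
    (ts.foldl (fun d t => d.modify t.2.2 [] (· ++ [t]))
      (PySem.Dict.empty : PySem.Dict Int (List (Int × Int × Int)))) hnd []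
  rw [hvals, hkeys]
  congr 1
  apply List.map_congr_left
  intro s hs
  rw [getD_fold]
  simp

-- ===== VERDICT (by name: the statement is the Claim_ definition above) =====
theorem orderByState_spec : Claim_equal_orderByState := by
  intro ts _; exact orderByState_spec' ts
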